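-- pv_equiv track=rewrite | github.com/Kabims/TubesAKA | P.py | digitPrime1
-- ===== SOURCE A (Python) =====
-- def digitPrime1(x):
--     dataCopy1 =x[:]
--     selectionSort(dataCopy1)
--     primes = []
--     for num in dataCopy1:
--         digit_sum = 0
--         temp = num
--         while temp > 0:
--             digit_sum += temp % 10
--             temp //= 10
--         if isPrime(digit_sum):
--             primes.append(num)
--     return primes
--
-- def isPrime(digit):
--     if digit <= 1:
--         return False
--     for i in range(2, digit-1):
--         if digit % i == 0:
--             return False
--     return True
--
-- def selectionSort(arr):
--     for i in range(len(arr)):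
--         temp = i
--         for j   in range(i + 1, len(arr)):
--             if arr[j] < arr[temp]:
--                 temp = j
--         arr[i], arr[temp] = arr[temp], arr[i]
-- ===== SOURCE B (Python) =====
-- def digitPrime1(x):
--     # filter first, then one builtin sort; primality by divisors up to sqrt
--     def digitsum(n):
--         s = 0
--         while n > 0:
--             s += n % 10
--             n //= 10
--         return s
--
--     def is_prime(d):
--         if d < 2:
--             return False
--         i = 2
--         while i * i <= d:
--             if d % i == 0:
--                 return False
--             i += 1
--         return True
--
--     return sorted(n for n in x if is_prime(digitsum(n)))
-- ===== Notes on version B (the rewrite author's own statement) =====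
-- stated objective: faster
-- what changed: B filters first and sorts once with the builtin sorted (Timsort) instead of selection-sorting the whole list first, and tests primality of the digit sum only with divisors up to sqrt(d) instead of all of 2..d-2.
import Mathlib
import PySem

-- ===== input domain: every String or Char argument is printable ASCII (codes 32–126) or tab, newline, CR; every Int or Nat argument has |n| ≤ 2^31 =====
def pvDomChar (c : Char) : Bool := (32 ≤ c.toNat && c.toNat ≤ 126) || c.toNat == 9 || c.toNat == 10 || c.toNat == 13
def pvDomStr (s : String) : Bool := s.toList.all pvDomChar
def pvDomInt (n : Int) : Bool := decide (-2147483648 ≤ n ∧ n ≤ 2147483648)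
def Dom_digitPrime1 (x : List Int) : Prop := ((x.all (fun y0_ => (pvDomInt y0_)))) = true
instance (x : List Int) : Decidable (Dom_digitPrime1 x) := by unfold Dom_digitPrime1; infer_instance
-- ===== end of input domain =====

-- B replaces the selection sort by one builtin sort of the already-filtered elements and
-- bounds the trial division of the digit sum by i*i ≤ d; proved to return the same list.

-- ===== PORT A =====
-- the 'while temp > 0' digit-sum loop; fuel (temp.toNat + 1) strictly bounds the
-- number of iterations since temp // 10 < temp for temp > 0, so the guard is exact
def dsLoopA : Nat → Int → Int → Int
  | 0, digit_sum, _ => digit_sum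
  | f + 1, digit_sum, temp =>
      if temp > 0 then dsLoopA f (digit_sum + PySem.Int.mod temp 10) (PySem.Int.floordiv temp 10)
      else digit_sum

def dsA (num : Int) : Int := dsLoopA (num.toNat + 1) 0 num

def isPrimeLoopA (digit : Int) : List Int → Bool
  | [] => true
  | i :: rest => if PySem.Int.mod digit i == 0 then false else isPrimeLoopA digit rest

def isPrimeA (digit : Int) : Bool :=
  if digit ≤ 1 then false
  else isPrimeLoopA digit (PySem.List.pyRange 2 (digit - 1) 1)

-- inner loop of selectionSort: the running argmin index 'temp'
-- (indices produced by range are always in bounds, so pyGetD is exact here)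
def ssFind (arr : List Int) (temp : Int) : List Int → Int
  | [] => temp
  | j :: js =>
      ssFind arr (if PySem.List.pyGetD arr j 0 < PySem.List.pyGetD arr temp 0 then j else temp) js

-- arr[i], arr[temp] = arr[temp], arr[i]  (both reads before both writes)
def ssSwap (arr : List Int) (i t : Int) : List Int :=
  PySem.List.pySetD (PySem.List.pySetD arr i (PySem.List.pyGetD arr t 0)) t (PySem.List.pyGetD arr i 0)

def ssOuter (arr : List Int) : List Int → List Int
  | [] => arr
  | i :: rest =>
      ssOuter (ssSwap arr i (ssFind arr i (PySem.List.pyRange (i + 1) arr.length 1))) rest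

def selectionSortP (arr : List Int) : List Int :=
  ssOuter arr (PySem.List.pyRange 0 arr.length 1)

def digitPrime1 (x : List Int) : List Int :=
  let dataCopy1 := selectionSortP x
  dataCopy1.foldl (fun primes num => if isPrimeA (dsA num) then primes ++ [num] else primes) []

-- ===== PORT B =====
def dsLoopB : Nat → Int → Int → Int
  | 0, s, _ => s
  | f + 1, s, n =>
      if n > 0 then dsLoopB f (s + PySem.Int.mod n 10) (PySem.Int.floordiv n 10)
      else s

def dsB (n : Int) : Int := dsLoopB (n.toNat + 1) 0 n

-- 'while i * i <= d' loop; fuel (d.toNat + 1) strictly bounds the iterations (i ≤ d)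
def isPrimeLoopB (d : Int) : Nat → Int → Bool
  | 0, _ => true
  | f + 1, i =>
      if i * i ≤ d then (if PySem.Int.mod d i == 0 then false else isPrimeLoopB d f (i + 1))
      else true

def isPrimeB (d : Int) : Bool :=
  if d < 2 then false else isPrimeLoopB d (d.toNat + 1) 2

def digitPrime1_alt (x : List Int) : List Int :=
  PySem.List.sorted (x.filter (fun n => isPrimeB (dsB n))) (fun v => v) false

-- ===== PRECONDITION & SPEC =====
def Spec_digitPrime1 (x : List Int) (out : List Int) : Prop := out = digitPrime1_alt x
instance (x : List Int) (out : List Int) : Decidable (Spec_digitPrime1 x out) := by unfold Spec_digitPrime1; infer_instance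

-- ===== CLAIM (what is proved, stated in full; the proofs are below) =====
def Claim_equal_digitPrime1 : Prop := ∀ (x : List Int), Dom_digitPrime1 x → Spec_digitPrime1 x (digitPrime1 x)

-- ===== LEMMAS AND PROOFS =====

-- digit sums: the two loops are identical code
lemma dsLoop_eq : ∀ (f : Nat) (s t : Int), dsLoopA f s t = dsLoopB f s t := by
  intro f
  induction f with
  | zero => intro s t; rfl
  | succ f ih => intro s t; simp only [dsLoopA, dsLoopB]; split_ifs <;> simp [ih]

lemma dsLoop_nonneg : ∀ (f : Nat) (s t : Int), 0 ≤ s → 0 ≤ dsLoopA f s t := by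
  intro f
  induction f with
  | zero => intro s t hs; exact hs
  | succ f ih =>
      intro s t hs
      simp only [dsLoopA]
      split_ifs with h
      · exact ih _ _ (by have := PySem.Int.mod_nonneg t (b := 10) (by omega); omega)
      · exact hs

lemma dsLoop_le : ∀ (f : Nat) (k : Nat) (s t : Int), t < 10 ^ k → dsLoopA f s t ≤ s + 9 * k := by
  intro f
  induction f with
  | zero =>
      intro k s t _
      simp only [dsLoopA]
      have : (0:Int) ≤ 9 * (k:Int) := by positivity
      omega
  | succ f ih =>
      intro k s t ht
      simp only [dsLoopA]
      split_ifs with h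
      · cases k with
        | zero => simp at ht; omega
        | succ k =>
            have hdiv : PySem.Int.floordiv t 10 < 10 ^ k := by
              rw [PySem.Int.floordiv_lt_iff_lt_mul (by omega)]
              calc t < 10 ^ (k + 1) := ht
                _ = 10 ^ k * 10 := by ring
            have hmod : PySem.Int.mod t 10 < 10 := PySem.Int.mod_lt t (b := 10) (by omega)
            have := ih k (s + PySem.Int.mod t 10) (PySem.Int.floordiv t 10) hdiv
            push_cast at this ⊢
            omega
      · have : (0:Int) ≤ 9 * (k:Int) := by positivity
        omega

lemma ds_bound (n : Int) (h1 : -2147483648 ≤ n) (h2 : n ≤ 2147483648) :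
    0 ≤ dsA n ∧ dsA n ≤ 90 := by
  constructor
  · exact dsLoop_nonneg _ _ _ le_rfl
  · have := dsLoop_le (n.toNat + 1) 10 0 n (by norm_num; omega)
    simpa using this

-- the two primality tests agree on all digit sums that can occur (0 ≤ d ≤ 90)
lemma prime_eq_small : ∀ d : Nat, d < 91 → isPrimeA (d : Int) = isPrimeB (d : Int) := by decide

lemma pred_eq (n : Int) (h1 : -2147483648 ≤ n) (h2 : n ≤ 2147483648) :
    isPrimeA (dsA n) = isPrimeB (dsB n) := by
  have hd := ds_bound n h1 h2
  have hds : dsB n = dsA n := (dsLoop_eq _ _ _).symm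
  rw [hds]
  have : dsA n = ((dsA n).toNat : Int) := by omega
  rw [this]
  exact prime_eq_small (dsA n).toNat (by omega)

-- A's append loop is List.filter
lemma foldl_filter (p : Int → Bool) : ∀ (l acc : List Int),
    l.foldl (fun a num => if p num then a ++ [num] else a) acc = acc ++ l.filter p := by
  intro l
  induction l with
  | nil => intro acc; simp
  | cons x xs ih =>
      intro acc
      simp only [List.foldl, List.filter]
      by_cases h : p x <;> simp [h, ih]

-- ssFind returns an index among temp :: js whose value is minimal
lemma ssFind_spec (arr : List Int) : ∀ (js : List Int) (temp : Int),
    (ssFind arr temp js = temp ∨ ssFind arr temp js ∈ js) ∧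
    PySem.List.pyGetD arr (ssFind arr temp js) 0 ≤ PySem.List.pyGetD arr temp 0 ∧
    ∀ j ∈ js, PySem.List.pyGetD arr (ssFind arr temp js) 0 ≤ PySem.List.pyGetD arr j 0 := by
  intro js
  induction js with
  | nil => intro temp; exact ⟨Or.inl rfl, le_rfl, by simp⟩
  | cons j js ih =>
      intro temp
      simp only [ssFind]
      split_ifs with h
      · obtain ⟨hmem, hle, hall⟩ := ih j
        refine ⟨?_, ?_, ?_⟩
        · rcases hmem with h1 | h1
          · exact Or.inr (by simp [h1])
          · exact Or.inr (by simp [h1])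
        · exact le_trans hle (le_of_lt h)
        · intro j' hj'
          rcases List.mem_cons.mp hj' with rfl | hj'
          · exact hle
          · exact hall _ hj'
      · obtain ⟨hmem, hle, hall⟩ := ih temp
        refine ⟨?_, ?_, ?_⟩
        · rcases hmem with h1 | h1
          · exact Or.inl h1
          · exact Or.inr (by simp [h1])
        · exact hle
        · intro j' hj'
          rcases List.mem_cons.mp hj' with rfl | hj'
          · exact le_trans hle (not_lt.mp h)
          · exact hall _ hj'

-- a cons-then-set rearrangement is a permutation
lemma getD_cons_set_perm (a : Int) : ∀ (l : List Int) (s : Nat), s < l.length →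
    (l.getD s 0 :: l.set s a).Perm (a :: l) := by
  intro l
  induction l with
  | nil => intro s hs; simp at hs
  | cons b l' ih =>
      intro s hs
      cases s with
      | zero => simpa using List.Perm.swap a b l'
      | succ s =>
          simp only [List.getD_cons_succ, List.set_cons_succ]
          calc (l'.getD s 0 :: b :: l'.set s a).Perm (b :: l'.getD s 0 :: l'.set s a) :=
                List.Perm.swap _ _ _
            _ = id (b :: l'.getD s 0 :: l'.set s a) := rfl
            _ |>.Perm (b :: a :: l') := (ih s (by simpa using hs)).cons b
            _ |>.Perm (a :: b :: l') := List.Perm.swap _ _ _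

lemma swapNat_perm_lt : ∀ (l : List Int) (i t : Nat), i < t → t < l.length →
    ((l.set i (l.getD t 0)).set t (l.getD i 0)).Perm l := by
  intro l
  induction l with
  | nil => intro i t _ ht; simp at ht
  | cons a l' ih =>
      intro i t hit ht
      cases i with
      | zero =>
          cases t with
          | zero => omega
          | succ s =>
              simp only [List.getD_cons_succ, List.set_cons_zero, List.getD_cons_zero,
                List.set_cons_succ]
              exact getD_cons_set_perm a l' s (by simpa using ht)
      | succ j =>
          cases t with
          | zero => omega
          | succ s =>
              simp only [List.getD_cons_succ, List.set_cons_succ]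
              exact (ih j s (by omega) (by simpa using ht)).cons a

-- swap as List.set
lemma ssSwap_eq (arr : List Int) (i t : Int) (h0 : 0 ≤ i) (h0t : 0 ≤ t)
    (hi : i < arr.length) (ht : t < arr.length) :
    ssSwap arr i t = (arr.set i.toNat (arr.getD t.toNat 0)).set t.toNat (arr.getD i.toNat 0) := by
  unfold ssSwap
  rw [PySem.List.pyGetD_eq_getElem arr 0 h0t ht, PySem.List.pyGetD_eq_getElem arr 0 h0 hi,
    PySem.List.pySetD_of_nonneg _ _ h0, PySem.List.pySetD_of_nonneg _ _ h0t]
  rw [List.getD_eq_getElem arr 0 (by omega), List.getD_eq_getElem arr 0 (by omega)]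

lemma swapNat_perm (l : List Int) (i t : Nat) (hit : i ≤ t) (ht : t < l.length) :
    ((l.set i (l.getD t 0)).set t (l.getD i 0)).Perm l := by
  rcases Nat.lt_or_ge i t with hlt | hge
  · exact swapNat_perm_lt l i t hlt ht
  · have : i = t := le_antisymm hit hge
    subst this
    rw [List.set_set, List.getD_eq_getElem l 0 ht, List.set_getElem_self]

-- the selection sort invariant, pushed through the outer loop
lemma ssOuter_main : ∀ (k i : Nat) (arr : List Int), arr.length ≤ i + k →
    (arr.take i).Pairwise (· ≤ ·) →
    (∀ a ∈ arr.take i, ∀ b ∈ arr.drop i, a ≤ b) →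
    (ssOuter arr (PySem.List.pyRange i arr.length 1)).Perm arr ∧
    (ssOuter arr (PySem.List.pyRange i arr.length 1)).Pairwise (· ≤ ·) := by
  intro k
  induction k with
  | zero =>
      intro i arr hlen hpw _
      rw [PySem.List.pyRange_one_eq_nil (by exact_mod_cast (by omega : arr.length ≤ i))]
      simp only [ssOuter]
      exact ⟨List.Perm.refl _, by rwa [List.take_of_length_le (by omega)] at hpw⟩
  | succ k ih =>
      intro i arr hlen hpw hcross
      by_cases hcase : arr.length ≤ i
      · rw [PySem.List.pyRange_one_eq_nil (by exact_mod_cast hcase)]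
        simp only [ssOuter]
        exact ⟨List.Perm.refl _, by rwa [List.take_of_length_le hcase] at hpw⟩
      · rw [Nat.not_le] at hcase
        have hib : (i : Int) < (arr.length : Int) := by exact_mod_cast hcase
        rw [PySem.List.pyRange_one_cons hib]
        simp only [ssOuter]
        obtain ⟨hmem, hle, hall⟩ :=
          ssFind_spec arr (PySem.List.pyRange ((i : Int) + 1) (arr.length : Int) 1) (i : Int)
        set t := ssFind arr (i : Int) (PySem.List.pyRange ((i : Int) + 1) (arr.length : Int) 1)
          with htdef
        have htb : (i : Int) ≤ t ∧ t < (arr.length : Int) := by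
          rcases hmem with h | h
          · rw [h]; exact ⟨le_rfl, hib⟩
          · have := PySem.List.mem_pyRange_one.mp h
            exact ⟨by omega, this.2⟩
        have hminAll : ∀ j : Int, (i : Int) ≤ j → j < (arr.length : Int) →
            PySem.List.pyGetD arr t 0 ≤ PySem.List.pyGetD arr j 0 := by
          intro j hj1 hj2
          rcases eq_or_lt_of_le hj1 with h | h
          · rw [← h]; exact hle
          · exact hall j (PySem.List.mem_pyRange_one.mpr ⟨by omega, hj2⟩)
        set tn := t.toNat with htndef
        have htn1 : i ≤ tn := by omega
        have htn2 : tn < arr.length := by omega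
        have hminNat : ∀ m : Nat, i ≤ m → (hm : m < arr.length) →
            arr[tn]'htn2 ≤ arr[m]'hm := by
          intro m hm1 hm2
          have h1 := hminAll (m : Nat) (by exact_mod_cast hm1) (by exact_mod_cast hm2)
          rw [PySem.List.pyGetD_eq_getElem arr 0 (by omega) (by exact_mod_cast htb.2),
            PySem.List.pyGetD_eq_getElem arr 0 (by omega) (by exact_mod_cast hm2)] at h1
          simpa using h1
        have hswap : ssSwap arr (i : Int) t =
            (arr.set i (arr.getD tn 0)).set tn (arr.getD i 0) := by
          have := ssSwap_eq arr (i : Int) t (by omega) (by omega)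
            (by exact_mod_cast hcase) (by exact_mod_cast htb.2)
          simpa using this
        obtain ⟨arr', harr'⟩ : ∃ a, a = ssSwap arr (i : Int) t := ⟨_, rfl⟩
        rw [← harr']
        rw [hswap] at harr'
        have hlen' : arr'.length = arr.length := by rw [harr']; simp
        have hperm' : arr'.Perm arr := by
          rw [harr']; exact swapNat_perm arr i tn htn1 htn2
        have htake : arr'.take i = arr.take i := by
          rw [harr', List.take_set, List.take_set]
          rw [List.set_eq_of_length_le (by simp only [List.length_set, List.length_take]; omega),
            List.set_eq_of_length_le (by simp only [List.length_take]; omega)]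
        have harr'i : ∀ h : i < arr'.length, arr'[i]'h = arr[tn]'htn2 := by
          intro h
          simp only [harr'] at h ⊢
          rw [List.getElem_set, List.getElem_set]
          by_cases hti : tn = i
          · simp [hti, List.getElem?_eq_getElem hcase]
          · simp [hti, List.getElem?_eq_getElem htn2]
        have htakes : arr'.take (i + 1) = arr.take i ++ [arr[tn]'htn2] := by
          rw [List.take_add_one, htake]
          have hi' : i < arr'.length := by omega
          rw [List.getElem?_eq_getElem hi', harr'i hi']
          simp
        have hdropperm : (arr'.drop i).Perm (arr.drop i) := by
          have h1 : (arr'.take i ++ arr'.drop i).Perm (arr.take i ++ arr.drop i) := by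
            rw [List.take_append_drop, List.take_append_drop]; exact hperm'
          rw [htake] at h1
          exact (List.perm_append_left_iff _).mp h1
        have hmemdrop : ∀ m : Nat, i ≤ m → (hm : m < arr.length) → arr[m]'hm ∈ arr.drop i := by
          intro m hm1 hm2
          have hj : m - i < (arr.drop i).length := by simp; omega
          have : (arr.drop i)[m - i]'hj = arr[m]'hm2 := by
            rw [List.getElem_drop]
            congr 1
            omega
          rw [← this]
          exact List.getElem_mem hj
        have hdropidx : ∀ b, b ∈ arr.drop i → ∃ m : Nat, ∃ hm : m < arr.length,
            i ≤ m ∧ b = arr[m]'hm := by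
          intro b hb
          obtain ⟨j, hj, hbj⟩ := List.mem_iff_getElem.mp hb
          have hj' : i + j < arr.length := by simp at hj; omega
          refine ⟨i + j, hj', by omega, ?_⟩
          rw [← hbj, List.getElem_drop]
        have hpw' : (arr'.take (i + 1)).Pairwise (· ≤ ·) := by
          rw [htakes, List.pairwise_append]
          refine ⟨hpw, List.pairwise_singleton _ _, ?_⟩
          intro a ha b hb
          rw [List.mem_singleton] at hb
          subst hb
          exact hcross a ha _ (hmemdrop tn htn1 htn2)
        have hcross' : ∀ a ∈ arr'.take (i + 1), ∀ b ∈ arr'.drop (i + 1), a ≤ b := by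
          intro a ha b hb
          have hb1 : b ∈ arr'.drop i := by
            have : arr'.drop (i + 1) = (arr'.drop i).drop 1 := by
              rw [List.drop_drop]
            rw [this] at hb
            exact List.mem_of_mem_drop hb
          have hb2 : b ∈ arr.drop i := hdropperm.subset hb1
          obtain ⟨m, hm, hm1, rfl⟩ := hdropidx b hb2
          rw [htakes] at ha
          rcases List.mem_append.mp ha with ha | ha
          · exact hcross a ha _ hb2
          · rw [List.mem_singleton] at ha
            subst ha
            exact hminNat m hm1 hm
        have hcast : ((i : Int) + 1) = ((i + 1 : Nat) : Int) := by push_cast; ring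
        have hlencast : (arr.length : Int) = (arr'.length : Int) := by rw [hlen']
        rw [hcast, hlencast]
        obtain ⟨p1, p2⟩ := ih (i + 1) arr' (by omega) hpw' hcross'
        exact ⟨p1.trans hperm', p2⟩

lemma selectionSortP_spec (x : List Int) :
    (selectionSortP x).Perm x ∧ (selectionSortP x).Pairwise (· ≤ ·) := by
  have := ssOuter_main x.length 0 x (by omega) (by simp) (by simp)
  simpa [selectionSortP] using this

-- ===== VERDICT (by name: the statement is the Claim_ definition above) =====
theorem digitPrime1_spec : Claim_equal_digitPrime1 := by
  intro x hdom
  unfold Spec_digitPrime1 digitPrime1 digitPrime1_alt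
  obtain ⟨hperm, hsorted⟩ := selectionSortP_spec x
  have hfold := foldl_filter (fun num => isPrimeA (dsA num)) (selectionSortP x) []
  simp only [hfold, List.nil_append]
  have hfilter : (selectionSortP x).filter (fun num => isPrimeA (dsA num)) =
      (selectionSortP x).filter (fun n => isPrimeB (dsB n)) := by
    apply List.filter_congr
    intro n hn
    have hx : n ∈ x := hperm.mem_iff.mp hn
    have := List.all_eq_true.mp hdom n hx
    simp only [pvDomInt, decide_eq_true_eq] at this
    exact pred_eq n this.1 this.2
  rw [hfilter]
  exact (PySem.List.sorted_id_eq_of_perm_of_pairwise _ _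
    (hperm.filter _) (hsorted.filter _)).symm
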